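-- pv_equiv track=rewrite | github.com/joyewon0705/bank-agent | backend/agent.py | extract_condition_keys
-- ===== SOURCE A (Python) =====
-- from typing import Any, Dict, List, Optional, Tuple
--
-- def extract_condition_keys(products: List[Dict[str, Any]], catalog: Dict[str, Dict[str, Any]]) -> List[str]:
--     text = "\n".join([p.get("special_condition_raw", "") or "" for p in products])
--     found: List[str] = []
--     for key, meta in (catalog or {}).items():
--         pats = meta.get("patterns") or []
--         for pat in pats:
--             if pat and pat in text:
--                 found.append(key)
--                 break
--     uniq: List[str] = []
--     for k in found:
--         if k not in uniq:
--             uniq.append(k)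
--     return uniq
-- ===== SOURCE B (Python) =====
-- from typing import Any, Dict, List
--
-- def extract_condition_keys(products: List[Dict[str, Any]], catalog: Dict[str, Dict[str, Any]]) -> List[str]:
--     text = "\n".join(p.get("special_condition_raw", "") or "" for p in products)
--     # inverted index: pattern -> keys that carry it; each distinct pattern is searched once
--     index: Dict[str, List[str]] = {}
--     for key, meta in (catalog or {}).items():
--         for pat in meta.get("patterns") or []:
--             if pat:
--                 index.setdefault(pat, []).append(key)
--     hit = set()
--     for pat, keys in index.items():
--         if pat in text:
--             hit.update(keys)
--     return [key for key in (catalog or {}) if key in hit]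
-- ===== Notes on version B (the rewrite author's own statement) =====
-- stated objective: alternative
-- what changed: B replaces A's per-key scan over its patterns (each pattern searched in the text once per key that lists it, plus a quadratic dedup pass) with an inverted index pattern->keys built in one pass, a single substring search per distinct pattern, and a final membership filter over the catalog keys, so the dedup pass disappears and duplicate patterns are searched only once.
import Mathlib
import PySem

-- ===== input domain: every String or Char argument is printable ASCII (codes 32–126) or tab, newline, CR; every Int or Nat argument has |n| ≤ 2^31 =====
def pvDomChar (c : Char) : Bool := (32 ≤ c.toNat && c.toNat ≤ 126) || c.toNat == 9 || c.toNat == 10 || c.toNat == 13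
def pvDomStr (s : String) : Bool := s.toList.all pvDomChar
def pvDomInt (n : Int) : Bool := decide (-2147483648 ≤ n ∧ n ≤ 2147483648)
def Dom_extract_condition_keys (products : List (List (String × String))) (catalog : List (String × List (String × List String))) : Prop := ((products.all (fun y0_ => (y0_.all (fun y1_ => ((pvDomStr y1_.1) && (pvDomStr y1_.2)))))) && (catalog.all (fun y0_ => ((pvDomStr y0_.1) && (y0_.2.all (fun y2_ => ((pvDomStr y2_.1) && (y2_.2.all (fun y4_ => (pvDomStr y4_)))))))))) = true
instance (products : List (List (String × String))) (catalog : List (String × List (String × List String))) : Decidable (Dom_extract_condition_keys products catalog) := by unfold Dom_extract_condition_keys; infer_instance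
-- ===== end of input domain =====

-- B builds an inverted index pattern → keys once and searches each distinct pattern in the text a single time,
-- instead of A's per-key scan over its patterns; same return value (objective: alternative algorithm).

-- ===== PORT A =====
-- text = "\n".join(p.get("special_condition_raw", "") or "" for p in products)  ('or ""' is the identity on strings)
def ecText (products : List (List (String × String))) : String :=
  PySem.Str.join "\n" (products.map (fun p => PySem.Dict.getD (PySem.Dict.ofList p) "special_condition_raw" ""))

-- the inner 'for pat in pats: if pat and pat in text: found.append(key); break'
def ecScanA (text key : String) (pats : List String) (found : List String) : List String :=
  match pats with
  | [] => found
  | pat :: rest =>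
    if pat ≠ "" ∧ PySem.Str.isIn pat text then found ++ [key] else ecScanA text key rest found

def extract_condition_keys (products : List (List (String × String))) (catalog : List (String × List (String × List String))) : List String :=
  let text := ecText products
  let found := (PySem.Dict.ofList catalog).items.foldl
    (fun found km => ecScanA text km.1 (PySem.Dict.getD (PySem.Dict.ofList km.2) "patterns" []) found) []
  -- 'uniq' dedup loop
  found.foldl (fun uniq k => if k ∈ uniq then uniq else uniq ++ [k]) []

-- ===== PORT B =====
-- index.setdefault(pat, []).append(key)  is  d[pat] = d.get(pat, []) + [key]
def extract_condition_keys_alt (products : List (List (String × String))) (catalog : List (String × List (String × List String))) : List String :=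
  let text := ecText products
  let items := (PySem.Dict.ofList catalog).items
  let index := items.foldl
    (fun d km =>
      (PySem.Dict.getD (PySem.Dict.ofList km.2) "patterns" []).foldl
        (fun d pat => if pat ≠ "" then d.modify pat [] (· ++ [km.1]) else d) d)
    (PySem.Dict.empty : PySem.Dict String (List String))
  let hit := index.items.foldl
    (fun h pk => if PySem.Str.isIn pk.1 text then PySem.Set.update h pk.2 else h)
    (PySem.Set.empty : PySem.Set String)
  (items.map (·.1)).filter (fun k => PySem.Set.contains hit k)

-- ===== PRECONDITION & SPEC =====
def Spec_extract_condition_keys (products : List (List (String × String))) (catalog : List (String × List (String × List String))) (out : List String) : Prop := out = extract_condition_keys_alt products catalog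
instance (products : List (List (String × String))) (catalog : List (String × List (String × List String))) (out : List String) : Decidable (Spec_extract_condition_keys products catalog out) := by unfold Spec_extract_condition_keys; infer_instance

-- ===== CLAIM (what is proved, stated in full; the proofs are below) =====
def Claim_equal_extract_condition_keys : Prop := ∀ (products : List (List (String × String))) (catalog : List (String × List (String × List String))), Dom_extract_condition_keys products catalog → Spec_extract_condition_keys products catalog (extract_condition_keys products catalog)

-- ===== LEMMAS AND PROOFS =====

-- the patterns of one catalog entry
def ecPats (m : List (String × List String)) : List String :=
  PySem.Dict.getD (PySem.Dict.ofList m) "patterns" []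

-- all (pattern, key) pairs of the catalog, nonempty patterns only, in B's insertion order
def ecPairs (items : List (String × List (String × List String))) : List (String × String) :=
  items.flatMap (fun km => ((ecPats km.2).filter (fun pat => decide (pat ≠ ""))).map (fun pat => (pat, km.1)))

-- A's inner scan appends the key iff some pattern hits
theorem ecScanA_eq (text key : String) (pats found : List String) :
    ecScanA text key pats found =
      if pats.any (fun pat => decide (pat ≠ "") && PySem.Str.isIn pat text) then found ++ [key] else found := by
  induction pats with
  | nil => simp [ecScanA]
  | cons pat rest ih =>
    by_cases h : pat ≠ "" ∧ PySem.Str.isIn pat text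
    · obtain ⟨h1, h2⟩ := h
      have h2' : PySem.Chars.isIn pat.toList text.toList = true := by simpa using h2
      simp [ecScanA, h1, h2', List.any_cons]
    · rw [ecScanA, if_neg h, ih]
      rcases not_and_or.mp h with h1 | h2
      · simp at h1; simp [List.any_cons, h1]
      · simp at h2; simp [List.any_cons, h2]

-- B's index build is a single fold over the flattened (pattern, key) pairs
theorem ecIndex_eq (items : List (String × List (String × List String)))
    (d : PySem.Dict String (List String)) :
    items.foldl
      (fun d km =>
        (PySem.Dict.getD (PySem.Dict.ofList km.2) "patterns" []).foldl
          (fun d pat => if pat ≠ "" then d.modify pat [] (· ++ [km.1]) else d) d) d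
    = (ecPairs items).foldl (fun d p => d.modify p.1 [] (· ++ [p.2])) d := by
  induction items generalizing d with
  | nil => simp [ecPairs]
  | cons km rest ih =>
    have hpairs : ecPairs (km :: rest)
        = ((ecPats km.2).filter (fun pat => decide (pat ≠ ""))).map (fun pat => (pat, km.1)) ++ ecPairs rest := by
      simp [ecPairs]
    rw [List.foldl_cons, hpairs, List.foldl_append, ih]
    congr 1
    rw [List.foldl_map, PySem.List.foldl_ite_eq_foldl_filter (p := fun pat => pat ≠ "")]
    rfl

-- membership in the hit set accumulated from the index items
theorem ecHit_mem (text : String) (l : List (String × List String)) (h : PySem.Set String) (y : String) :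
    y ∈ l.foldl (fun h pk => if PySem.Str.isIn pk.1 text then PySem.Set.update h pk.2 else h) h ↔
      y ∈ h ∨ ∃ pk ∈ l, PySem.Str.isIn pk.1 text = true ∧ y ∈ pk.2 := by
  induction l generalizing h with
  | nil => simp
  | cons pk rest ih =>
    simp only [List.foldl_cons]
    by_cases hp : PySem.Str.isIn pk.1 text = true
    · rw [if_pos hp, ih]
      simp only [PySem.Set.mem_update, List.mem_cons]
      constructor
      · rintro ((hy | hm) | ⟨q, hq, hi, hm⟩)
        · exact Or.inl hy
        · exact Or.inr ⟨pk, Or.inl rfl, hp, hm⟩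
        · exact Or.inr ⟨q, Or.inr hq, hi, hm⟩
      · rintro (hy | ⟨q, (rfl | hq), hi, hm⟩)
        · exact Or.inl (Or.inl hy)
        · exact Or.inl (Or.inr hm)
        · exact Or.inr ⟨q, hq, hi, hm⟩
    · rw [if_neg hp, ih]
      simp only [List.mem_cons]
      constructor
      · rintro (hy | ⟨q, hq, hi, hm⟩)
        · exact Or.inl hy
        · exact Or.inr ⟨q, Or.inr hq, hi, hm⟩
      · rintro (hy | ⟨q, (rfl | hq), hi, hm⟩)
        · exact Or.inl hy
        · exact absurd hi hp
        · exact Or.inr ⟨q, hq, hi, hm⟩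

-- the dedup loop on an already-duplicate-free list is the identity
theorem ecUniq_eq (l : List String) (hl : l.Nodup) :
    l.foldl (fun uniq k => if k ∈ uniq then uniq else uniq ++ [k]) [] = l := by
  have h1 : l.foldl (fun uniq k => if k ∈ uniq then uniq else uniq ++ [k]) []
      = l.foldl (fun s k => PySem.Set.add s k) [] :=
    PySem.List.foldl_congr_mem _ _ _ _ (fun acc x _ => (PySem.Set.add_eq_ite acc x).symm)
  rw [h1, ← PySem.Set.ofList_eq_foldl]
  exact PySem.Set.ofList_eq_self_of_nodup _ hl

-- B's index, then B's hit set, as standalone functions (proof-side names for the port's lets)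
def ecIndexOf (items : List (String × List (String × List String))) : PySem.Dict String (List String) :=
  items.foldl
    (fun d km =>
      (PySem.Dict.getD (PySem.Dict.ofList km.2) "patterns" []).foldl
        (fun d pat => if pat ≠ "" then d.modify pat [] (· ++ [km.1]) else d) d)
    (PySem.Dict.empty : PySem.Dict String (List String))

def ecHitOf (text : String) (items : List (String × List (String × List String))) : PySem.Set String :=
  (ecIndexOf items).items.foldl
    (fun h pk => if PySem.Str.isIn pk.1 text then PySem.Set.update h pk.2 else h)
    (PySem.Set.empty : PySem.Set String)

theorem ecAlt_eq (products : List (List (String × String))) (catalog : List (String × List (String × List String))) :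
    extract_condition_keys_alt products catalog
      = ((PySem.Dict.ofList catalog).items.map (·.1)).filter
          (fun k => PySem.Set.contains (ecHitOf (ecText products) (PySem.Dict.ofList catalog).items) k) := rfl

-- membership characterisation of B's hit set
theorem ecHit_char (text : String) (items : List (String × List (String × List String))) (y : String) :
    y ∈ ecHitOf text items ↔
      ∃ km ∈ items, km.1 = y ∧ ∃ pat ∈ ecPats km.2, pat ≠ "" ∧ PySem.Str.isIn pat text = true := by
  rw [ecHitOf, ecHit_mem]
  have hidx : ecIndexOf items = (ecPairs items).foldl (fun d p => d.modify p.1 [] (· ++ [p.2])) PySem.Dict.empty :=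
    ecIndex_eq items _
  have hnd : (ecIndexOf items).keys.Nodup := by
    rw [ecIndexOf, ecIndex_eq]
    exact PySem.Dict.nodup_keys_foldl_modify_key (ecPairs items) (fun p => p.1) []
      (fun d p => (· ++ [p.2])) PySem.Dict.empty PySem.Dict.nodup_keys_empty
  have hkeys : (ecIndexOf items).keys = PySem.Set.ofList ((ecPairs items).map (·.1)) := by
    rw [hidx, PySem.Dict.keys_foldl_modify_key]
    simp [PySem.Set.update_nil_left]
  have hgetD : ∀ c, (ecIndexOf items).getD c []
      = ((ecPairs items).filter (fun p => p.1 == c)).map (·.2) := by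
    intro c
    rw [hidx, PySem.Dict.getD_foldl_modify_append]
    simp
  rw [PySem.Dict.items_eq_map_keys _ hnd ([] : List String)]
  simp only [PySem.Set.empty, List.mem_nil_iff, false_or, List.mem_map]
  constructor
  · rintro ⟨pk, ⟨k, hk, rfl⟩, hi, hm⟩
    rw [hgetD k] at hm
    simp only [List.mem_map, List.mem_filter, beq_iff_eq] at hm
    obtain ⟨q, ⟨hq, rfl⟩, rfl⟩ := hm
    simp only [ecPairs, List.mem_flatMap, List.mem_map, List.mem_filter, decide_eq_true_eq] at hq
    obtain ⟨km, hkm, pat, ⟨hpat, hne⟩, rfl⟩ := hq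
    exact ⟨km, hkm, rfl, pat, hpat, hne, hi⟩
  · rintro ⟨km, hkm, rfl, pat, hpat, hne, hi⟩
    have hq : (pat, km.1) ∈ ecPairs items := by
      simp only [ecPairs, List.mem_flatMap, List.mem_map, List.mem_filter, decide_eq_true_eq]
      exact ⟨km, hkm, pat, ⟨hpat, hne⟩, rfl⟩
    refine ⟨(pat, (ecIndexOf items).getD pat []), ⟨pat, ?_, rfl⟩, hi, ?_⟩
    · rw [hkeys, PySem.Set.mem_ofList]
      exact List.mem_map.mpr ⟨(pat, km.1), hq, rfl⟩
    · rw [hgetD pat]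
      exact List.mem_map.mpr ⟨(pat, km.1), List.mem_filter.mpr ⟨hq, by simp⟩, rfl⟩

-- ===== VERDICT (by name: the statement is the Claim_ definition above) =====
theorem extract_condition_keys_spec : Claim_equal_extract_condition_keys := by
  intro products catalog _
  unfold Spec_extract_condition_keys
  rw [ecAlt_eq]
  set text := ecText products with htext
  set C := (PySem.Dict.ofList catalog).items with hC
  have hk : (C.map (·.1)).Nodup := by
    have := PySem.Dict.nodup_keys_ofList (ps := catalog)
    simpa [PySem.Dict.keys, hC] using this
  -- A's side
  show (C.foldl (fun found km =>
      ecScanA text km.1 (PySem.Dict.getD (PySem.Dict.ofList km.2) "patterns" []) found) []).foldl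
      (fun uniq k => if k ∈ uniq then uniq else uniq ++ [k]) [] = _
  have hfound : C.foldl (fun found km =>
      ecScanA text km.1 (PySem.Dict.getD (PySem.Dict.ofList km.2) "patterns" []) found) []
      = (C.filter (fun km => (ecPats km.2).any
          (fun pat => decide (pat ≠ "") && PySem.Str.isIn pat text))).map (·.1) := by
    have h1 := PySem.List.foldl_congr_mem
      (l := C) (init := ([] : List String))
      (f := fun found km => ecScanA text km.1 (PySem.Dict.getD (PySem.Dict.ofList km.2) "patterns" []) found)
      (g := fun found km => if (ecPats km.2).any (fun pat => decide (pat ≠ "") && PySem.Str.isIn pat text)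
            then found ++ [km.1] else found)
      (fun acc km _ => ecScanA_eq text km.1 _ acc)
    rw [h1, PySem.List.foldl_append_if]
    simp
  rw [hfound]
  have hnodup : ((C.filter (fun km => (ecPats km.2).any
      (fun pat => decide (pat ≠ "") && PySem.Str.isIn pat text))).map (·.1)).Nodup :=
    hk.sublist (List.Sublist.map _ List.filter_sublist)
  rw [ecUniq_eq _ hnodup]
  -- B's side
  rw [List.filter_map]
  congr 1
  symm
  apply List.filter_congr
  intro km hkm
  show PySem.Set.contains (ecHitOf text C) km.1
      = (ecPats km.2).any (fun pat => decide (pat ≠ "") && PySem.Str.isIn pat text)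
  rw [Bool.eq_iff_iff, PySem.Set.contains_iff, ecHit_char]
  constructor
  · rintro ⟨km', hkm', heq, pat, hpat, hne, hi⟩
    have : km' = km := List.inj_on_of_nodup_map hk hkm' hkm heq
    subst this
    simp only [List.any_eq_true, Bool.and_eq_true, decide_eq_true_eq]
    exact ⟨pat, hpat, hne, hi⟩
  · intro hany
    simp only [List.any_eq_true, Bool.and_eq_true, decide_eq_true_eq] at hany
    obtain ⟨pat, hpat, hne, hi⟩ := hany
    exact ⟨km, hkm, rfl, pat, hpat, hne, hi⟩
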